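-- pv_equiv track=rewrite | github.com/MeanderingProgrammer/advent-of-code | 2020/6-customs-questions/question_results.py | group_data
-- ===== SOURCE A (Python) =====
-- def group_data(data):
--     groups = []
--     current_group = []
--     for datum in data:
--         if len(datum) == 0:
--             groups.append(current_group)
--             current_group = []
--         else:
--             current_group.append(datum)
--     groups.append(current_group)
--     return groups
-- ===== SOURCE B (Python) =====
-- def group_data(data):
--     data = list(data)
--     bounds = [i for i, d in enumerate(data) if len(d) == 0]
--     groups = []
--     start = 0
--     for idx in bounds:
--         groups.append(data[start:idx])
--         start = idx + 1
--     groups.append(data[start:])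
--     return groups
-- ===== Notes on version B (the rewrite author's own statement) =====
-- stated objective: alternative
-- what changed: B replaces A's single element-wise accumulator loop with a boundary-index decomposition: it collects the positions of empty strings once, then emits each group as a slice data[start:idx] between consecutive boundaries plus a final slice data[start:].
import Mathlib
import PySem

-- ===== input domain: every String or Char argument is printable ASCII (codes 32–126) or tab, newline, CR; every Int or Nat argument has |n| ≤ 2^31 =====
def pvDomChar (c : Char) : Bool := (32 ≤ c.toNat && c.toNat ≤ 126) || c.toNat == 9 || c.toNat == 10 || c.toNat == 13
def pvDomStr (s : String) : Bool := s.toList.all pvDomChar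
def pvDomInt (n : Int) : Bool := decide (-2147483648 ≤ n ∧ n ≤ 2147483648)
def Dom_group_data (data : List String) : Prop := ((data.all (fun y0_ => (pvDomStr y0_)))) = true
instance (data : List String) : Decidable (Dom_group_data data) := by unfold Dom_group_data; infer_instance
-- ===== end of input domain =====

-- B replaces A's element-wise accumulator loop with a boundary-index decomposition (collect
-- positions of empty strings, then slice between consecutive boundaries); objective: alternative.


-- ===== PORT A =====
def group_data (data : List String) : List (List String) :=
  let s := data.foldl
    (fun (st : List (List String) × List String) datum =>
      if PySem.Str.len datum == 0 then (st.1 ++ [st.2], []) else (st.1, st.2 ++ [datum]))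
    ([], [])
  s.1 ++ [s.2]

-- ===== PORT B =====
def group_data_alt (data : List String) : List (List String) :=
  let bounds := ((PySem.List.enumerate data 0).filter
      (fun p => PySem.Str.len p.2 == 0)).map (·.1)
  let s := bounds.foldl
    (fun (st : List (List String) × Int) idx =>
      (st.1 ++ [PySem.List.slice data (some st.2) (some idx)], idx + 1))
    ([], 0)
  s.1 ++ [PySem.List.slice data (some s.2) none]

-- ===== PRECONDITION & SPEC =====
def Spec_group_data (data : List String) (out : List (List String)) : Prop := out = group_data_alt data
instance (data : List String) (out : List (List String)) : Decidable (Spec_group_data data out) := by unfold Spec_group_data; infer_instance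

-- ===== CLAIM (what is proved, stated in full; the proofs are below) =====
def Claim_equal_group_data : Prop := ∀ (data : List String), Dom_group_data data → Spec_group_data data (group_data data)

-- ===== LEMMAS AND PROOFS =====

-- Key invariant: folding B's boundary list for the suffix `rest = data.drop n`, starting the
-- cursor at `start`, produces the same groups as folding A's accumulator loop over `rest`
-- with current group `(data.drop start).take (n - start)`.
theorem group_data_key (data : List String) :
    ∀ (rest : List String) (n start : Nat) (gs : List (List String)),
      data.drop n = rest → start ≤ n →
      (let s := (((PySem.List.enumerate rest (n : Int)).filter
            (fun p => PySem.Str.len p.2 == 0)).map (·.1)).foldl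
          (fun (st : List (List String) × Int) idx =>
            (st.1 ++ [PySem.List.slice data (some st.2) (some idx)], idx + 1))
          (gs, (start : Int));
        s.1 ++ [PySem.List.slice data (some s.2) none]) =
      (let t := rest.foldl
          (fun (st : List (List String) × List String) datum =>
            if PySem.Str.len datum == 0 then (st.1 ++ [st.2], []) else (st.1, st.2 ++ [datum]))
          (gs, (data.drop start).take (n - start));
        t.1 ++ [t.2]) := by
  intro rest
  induction rest with
  | nil =>
    intro n start gs hdrop hle
    have hlen : data.length ≤ n := List.drop_eq_nil_iff.mp hdrop
    simp [PySem.List.enumerate_nil, PySem.List.slice_from_natCast,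
      List.take_of_length_le (by simp; omega : (data.drop start).length ≤ n - start)]
  | cons d rest' ih =>
    intro n start gs hdrop hle
    have hn : n < data.length := by
      by_contra h
      simp [List.drop_eq_nil_iff.mpr (by omega : data.length ≤ n)] at hdrop
    have hdrop' : data.drop (n + 1) = rest' := by
      have h0 : (data.drop n).tail = data.drop (n + 1) := List.tail_drop
      rw [hdrop] at h0
      simpa using h0.symm
    have hget : data[n]? = some d := by
      have h0 : (data.drop n)[0]? = data[n + 0]? := List.getElem?_drop
      rw [hdrop] at h0
      simpa using h0.symm
    rw [PySem.List.enumerate_cons]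
    have h1 : ((n : Int) + 1) = ((n + 1 : Nat) : Int) := by push_cast; ring
    by_cases hd : (PySem.Str.len d == 0) = true
    · rw [List.filter_cons_of_pos (by simpa using hd), List.map_cons, List.foldl_cons]
      simp only
      rw [PySem.List.slice_natCast, h1, List.foldl_cons, if_pos hd]
      have := ih (n + 1) (n + 1) (gs ++ [(data.drop start).take (n - start)]) hdrop' le_rfl
      simpa using this
    · rw [List.filter_cons_of_neg (by simpa using hd), h1, List.foldl_cons, if_neg hd]
      have hcur : (data.drop start).take (n - start) ++ [d] =
          (data.drop start).take (n + 1 - start) := by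
        have he : n + 1 - start = (n - start) + 1 := by omega
        rw [he, List.take_add_one]
        have h2 : (data.drop start)[n - start]? = some d := by
          have h0 : (data.drop start)[n - start]? = data[start + (n - start)]? :=
            List.getElem?_drop
          rw [h0, (by omega : start + (n - start) = n), hget]
        simp [h2]
      have := ih (n + 1) start gs hdrop' (by omega)
      rw [← hcur] at this
      simpa using this

-- ===== VERDICT (by name: the statement is the Claim_ definition above) =====
theorem group_data_spec : Claim_equal_group_data := by
  intro data _
  unfold Spec_group_data group_data group_data_alt
  have := group_data_key data data 0 0 [] (by simp) (le_refl _)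
  simpa using this.symm
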